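-- pv_equiv track=rewrite | github.com/ShabirZ/AA-Roblox-Automation | snow_macro.py | collapse_1D
-- ===== SOURCE A (Python) =====
-- def collapse_1D(cluster, color):
--     pixel_map = {}
--     for y,x in cluster:
--         if x not in pixel_map:
--             pixel_map[x] = y
--
--         if color == 'Green':
--             pixel_map[x] = max(y, pixel_map[x])
--         elif color == 'Red':
--             pixel_map[x] = min(y, pixel_map[x])
--     return pixel_map
-- ===== SOURCE B (Python) =====
-- def collapse_1D(cluster, color):
--     groups = {}
--     for y, x in cluster:
--         groups.setdefault(x, []).append(y)
--     if color == 'Green':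
--         pick = max
--     elif color == 'Red':
--         pick = min
--     else:
--         pick = lambda ys: ys[0]
--     return {x: pick(ys) for x, ys in groups.items()}
-- ===== Notes on version B (the rewrite author's own statement) =====
-- stated objective: alternative
-- what changed: The single interleaved conditional-update loop is split into two phases: one pass groups all y-values per x into lists, then a reduce pass applies max/min/first-element per column.
import Mathlib
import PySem

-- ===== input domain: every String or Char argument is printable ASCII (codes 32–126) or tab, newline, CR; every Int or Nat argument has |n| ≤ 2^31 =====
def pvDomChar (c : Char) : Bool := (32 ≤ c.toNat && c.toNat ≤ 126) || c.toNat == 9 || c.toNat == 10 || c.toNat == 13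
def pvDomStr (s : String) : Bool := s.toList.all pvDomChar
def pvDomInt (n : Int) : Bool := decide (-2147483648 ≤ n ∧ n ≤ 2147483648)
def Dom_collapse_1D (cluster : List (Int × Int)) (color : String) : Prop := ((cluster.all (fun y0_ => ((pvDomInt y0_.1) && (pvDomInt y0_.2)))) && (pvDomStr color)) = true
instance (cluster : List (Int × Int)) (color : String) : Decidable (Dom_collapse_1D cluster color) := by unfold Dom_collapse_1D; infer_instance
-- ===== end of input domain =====

-- B replaces A's interleaved conditional-update loop by a group-then-reduce pass (alternative decomposition, same cost).

-- ===== PORT A =====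
def collapse_1D (cluster : List (Int × Int)) (color : String) : List (Int × Int) :=
  (cluster.foldl (fun pm p =>
    let pm1 := if pm.contains p.2 then pm else pm.insert p.2 p.1
    if color == "Green" then pm1.insert p.2 (max p.1 (pm1.getD p.2 0))
    else if color == "Red" then pm1.insert p.2 (min p.1 (pm1.getD p.2 0))
    else pm1) (PySem.Dict.empty : PySem.Dict Int Int)).items

-- ===== PORT B =====
def collapse_1D_alt (cluster : List (Int × Int)) (color : String) : List (Int × Int) :=
  let groups := cluster.foldl (fun d p => d.modify p.2 [] (fun ys => ys ++ [p.1]))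
      (PySem.Dict.empty : PySem.Dict Int (List Int))
  groups.items.map (fun q => (q.1,
    if color == "Green" then (PySem.List.max? q.2 (fun v => v)).getD 0
    else if color == "Red" then (PySem.List.min? q.2 (fun v => v)).getD 0
    else (PySem.List.pyGet? q.2 0).getD 0))

-- ===== PRECONDITION & SPEC =====
def Spec_collapse_1D (cluster : List (Int × Int)) (color : String) (out : List (Int × Int)) : Prop := out = collapse_1D_alt cluster color
instance (cluster : List (Int × Int)) (color : String) (out : List (Int × Int)) : Decidable (Spec_collapse_1D cluster color out) := by unfold Spec_collapse_1D; infer_instance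

-- ===== CLAIM (what is proved, stated in full; the proofs are below) =====
def Claim_equal_collapse_1D : Prop := ∀ (cluster : List (Int × Int)) (color : String), Dom_collapse_1D cluster color → Spec_collapse_1D cluster color (collapse_1D cluster color)

-- ===== LEMMAS AND PROOFS =====

/-- The per-column reduction B applies to a grouped list of y-values. -/
def pvRed (color : String) (ys : List Int) : Int :=
  if color == "Green" then (PySem.List.max? ys (fun v => v)).getD 0
  else if color == "Red" then (PySem.List.min? ys (fun v => v)).getD 0
  else (PySem.List.pyGet? ys 0).getD 0

lemma pvRed_singleton (color : String) (y : Int) : pvRed color [y] = y := by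
  simp [pvRed, PySem.List.max?_id_cons, PySem.List.min?_id_cons, PySem.List.pyGet?, PySem.List.pyIdx?]

lemma pvRed_append (color : String) (ys : List Int) (y : Int) (h : ys ≠ []) :
    pvRed color (ys ++ [y]) =
      if color == "Green" then max y (pvRed color ys)
      else if color == "Red" then min y (pvRed color ys)
      else pvRed color ys := by
  obtain ⟨a, t, rfl⟩ : ∃ a t, ys = a :: t := by
    cases ys with
    | nil => exact absurd rfl h
    | cons a t => exact ⟨a, t, rfl⟩
  simp only [pvRed, List.cons_append, PySem.List.max?_id_cons, PySem.List.min?_id_cons,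
    List.foldl_append]
  split_ifs <;> simp [PySem.List.pyGet?, PySem.List.pyIdx?, max_comm, min_comm,
    show (0:Int) ≤ (t.length:Int) + 1 by positivity]

/-- One step of A's loop. -/
def pvStepA (color : String) (pm : PySem.Dict Int Int) (p : Int × Int) : PySem.Dict Int Int :=
  let pm1 := if pm.contains p.2 then pm else pm.insert p.2 p.1
  if color == "Green" then pm1.insert p.2 (max p.1 (pm1.getD p.2 0))
  else if color == "Red" then pm1.insert p.2 (min p.1 (pm1.getD p.2 0))
  else pm1

/-- One step of B's grouping loop. -/
def pvStepG (d : PySem.Dict Int (List Int)) (p : Int × Int) : PySem.Dict Int (List Int) :=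
  d.modify p.2 [] (fun ys => ys ++ [p.1])

lemma pv_fold_inv (color : String) :
    ∀ (l : List (Int × Int)) (dA : PySem.Dict Int Int) (dG : PySem.Dict Int (List Int)),
      dA.keys = dG.keys →
      (∀ k ∈ dG.keys, dG.getD k [] ≠ []) →
      (∀ k ∈ dG.keys, dA.getD k 0 = pvRed color (dG.getD k [])) →
      (l.foldl (pvStepA color) dA).keys = (l.foldl pvStepG dG).keys ∧
      (∀ k ∈ (l.foldl pvStepG dG).keys, (l.foldl pvStepG dG).getD k [] ≠ []) ∧
      (∀ k ∈ (l.foldl pvStepG dG).keys,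
        (l.foldl (pvStepA color) dA).getD k 0 = pvRed color ((l.foldl pvStepG dG).getD k [])) := by
  intro l
  induction l with
  | nil => intro dA dG h1 h2 h3; exact ⟨h1, h2, h3⟩
  | cons p rest ih =>
    obtain ⟨y, x⟩ := p
    intro dA dG h1 h2 h3
    simp only [List.foldl_cons]
    have hcc : dA.contains x = dG.contains x := by
      rw [PySem.Dict.contains_eq_decide_mem_keys, PySem.Dict.contains_eq_decide_mem_keys, h1]
    have hkG : (pvStepG dG (y, x)).keys = if dG.contains x then dG.keys else dG.keys ++ [x] := by
      rw [pvStepG, PySem.Dict.keys_modify]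
      by_cases hc : dG.contains x
      · rw [PySem.Dict.keys_insert_of_contains _ _ hc]; simp [hc]
      · rw [PySem.Dict.keys_insert_of_not_contains _ _ (by simp_all)]; simp [hc]
    have hkA : (pvStepA color dA (y, x)).keys = if dG.contains x then dA.keys else dA.keys ++ [x] := by
      by_cases hc : dG.contains x
      · have hA : dA.contains x = true := hcc.trans (by simp [hc])
        simp only [pvStepA, hA, if_true]
        split_ifs <;>
          simp [PySem.Dict.keys_insert_of_contains _ _ hA]
      · have hA : dA.contains x = false := by rw [hcc]; simp [hc]
        simp only [pvStepA, hA, Bool.false_eq_true, if_false]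
        split_ifs <;>
          simp [PySem.Dict.keys_insert_of_contains _ _ (PySem.Dict.contains_insert_self dA x y),
            PySem.Dict.keys_insert_of_not_contains _ _ hA]
    have hmemG : ∀ k, k ∈ (pvStepG dG (y, x)).keys → k ≠ x → k ∈ dG.keys := by
      intro k hk hkx
      rw [hkG] at hk
      by_cases hc : dG.contains x <;> simp [hc] at hk <;> tauto
    have hx0 : (pvStepG dG (y, x)).getD x [] = dG.getD x [] ++ [y] := by
      rw [pvStepG, PySem.Dict.getD_modify]; simp
    have hgG : ∀ k, k ≠ x → (pvStepG dG (y, x)).getD k [] = dG.getD k [] := by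
      intro k hkx; rw [pvStepG, PySem.Dict.getD_modify]; simp [hkx]
    have hgA : ∀ k, k ≠ x → (pvStepA color dA (y, x)).getD k 0 = dA.getD k 0 := by
      intro k hkx
      simp only [pvStepA]
      split_ifs <;>
        simp [PySem.Dict.getD_insert, hkx]
    have hgAx : (pvStepA color dA (y, x)).getD x 0 = pvRed color ((pvStepG dG (y, x)).getD x []) := by
      rw [hx0]
      by_cases hc : dG.contains x
      · have hA : dA.contains x = true := hcc.trans (by simp [hc])
        have hmem : x ∈ dG.keys := by
          have h' := PySem.Dict.contains_eq_decide_mem_keys dG x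
          rw [hc] at h'; exact of_decide_eq_true h'.symm
        rw [pvRed_append color _ y (h2 x hmem)]
        simp only [pvStepA, hA, if_true]
        split_ifs <;> simp [h3 x hmem]
      · have hA : dA.contains x = false := by rw [hcc]; simp [hc]
        have hG0 : dG.getD x [] = [] := PySem.Dict.getD_of_not_contains dG [] (by simpa using hc)
        rw [hG0]
        simp only [List.nil_append, pvRed_singleton]
        simp only [pvStepA, hA, Bool.false_eq_true, if_false]
        split_ifs <;> simp
    apply ih
    · rw [hkA, hkG, h1]
    · intro k hk
      by_cases hkx : k = x
      · subst hkx; rw [hx0]; simp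
      · rw [hgG k hkx]; exact h2 k (hmemG k hk hkx)
    · intro k hk
      by_cases hkx : k = x
      · subst hkx; exact hgAx
      · rw [hgA k hkx, hgG k hkx]; exact h3 k (hmemG k hk hkx)

-- ===== VERDICT (by name: the statement is the Claim_ definition above) =====
theorem collapse_1D_spec : Claim_equal_collapse_1D := by
  intro cluster color _
  show collapse_1D cluster color = collapse_1D_alt cluster color
  have hA : collapse_1D cluster color =
      (cluster.foldl (pvStepA color) (PySem.Dict.empty : PySem.Dict Int Int)).items := rfl
  have hB : collapse_1D_alt cluster color =
      (cluster.foldl pvStepG (PySem.Dict.empty : PySem.Dict Int (List Int))).items.map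
        (fun q => (q.1, pvRed color q.2)) := rfl
  rw [hA, hB]
  obtain ⟨hk, hne, hval⟩ := pv_fold_inv color cluster PySem.Dict.empty PySem.Dict.empty
    (by simp) (by simp) (by simp)
  have hnodupG : (cluster.foldl pvStepG (PySem.Dict.empty : PySem.Dict Int (List Int))).keys.Nodup := by
    have := PySem.Dict.nodup_keys_foldl_modify_key cluster (fun p => p.2) ([] : List Int)
      (fun _ p ys => ys ++ [p.1]) PySem.Dict.empty (by simp)
    simpa [pvStepG] using this
  rw [PySem.Dict.items_eq_map_keys _ (hk ▸ hnodupG) 0,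
    PySem.Dict.items_eq_map_keys _ hnodupG ([] : List Int), List.map_map, hk]
  exact List.map_congr_left (fun k hkm => by simp [hval k hkm])
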